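-- pv_equiv track=rewrite | github.com/JulianNeuberger/pet-baselines | augmentation_experiments.py | get_combinations_of_choices
-- ===== SOURCE A (Python) =====
-- import itertools
-- import typing
--
-- def get_combinations_of_choices(
--     choices: typing.Sequence, max_length: int = 1
-- ) -> typing.Sequence:
--     """
--     generates all the combinations from choices with a given max length
--     """
--     for c in choices:
--         assert (
--             "##" not in choices
--         ), "A choice contains the char sequence ## which is not supported right now."
--     assert max_length <= len(choices)
--     combinations = []
--     for length in range(1, max_length + 1):
--         combinations.extend(
--             ["##".join(x) for x in itertools.combinations(choices, length)]
--         )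
--     return combinations
-- ===== SOURCE B (Python) =====
-- def get_combinations_of_choices(choices, max_length=1):
--     """
--     generates all the combinations from choices with a given max length
--     """
--     for c in choices:
--         assert (
--             "##" not in choices
--         ), "A choice contains the char sequence ## which is not supported right now."
--     assert max_length <= len(choices)
--     n = len(choices)
--     out = []
--
--     def emit(start, picked, target):
--         if len(picked) == target:
--             out.append("##".join(picked))
--             return
--         for i in range(start, n):
--             picked.append(choices[i])
--             emit(i + 1, picked, target)
--             picked.pop()
--
--     for target in range(1, max_length + 1):
--         emit(0, [], target)
--     return out
-- ===== Notes on version B (the rewrite author's own statement) =====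
-- stated objective: alternative
-- what changed: Replaces the itertools.combinations calls (which materialize tuples) with a hand-written recursive backtracking enumerator that appends '##'-joined strings directly into the output in the same length-then-lexicographic order.
import Mathlib
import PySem

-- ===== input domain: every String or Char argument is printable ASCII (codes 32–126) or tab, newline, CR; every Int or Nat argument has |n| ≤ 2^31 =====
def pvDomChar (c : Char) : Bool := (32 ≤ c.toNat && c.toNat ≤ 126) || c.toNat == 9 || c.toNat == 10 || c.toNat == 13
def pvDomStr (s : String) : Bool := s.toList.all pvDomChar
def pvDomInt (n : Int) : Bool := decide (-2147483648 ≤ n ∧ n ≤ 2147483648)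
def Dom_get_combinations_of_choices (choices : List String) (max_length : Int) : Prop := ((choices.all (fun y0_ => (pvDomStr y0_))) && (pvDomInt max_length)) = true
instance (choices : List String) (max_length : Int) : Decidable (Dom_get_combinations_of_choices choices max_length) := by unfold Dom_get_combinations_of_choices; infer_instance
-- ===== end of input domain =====

-- B replaces the itertools.combinations calls with a recursive backtracking enumerator
-- emitting the '##'-joined strings directly (same output, alternative decomposition).

-- ===== PORT A =====
-- transliteration of itertools.combinations(choices, length): subsets of size k,
-- emitted in lexicographic order of their index tuples (itertools' documented order)
def pvCombA (k : Nat) (xs : List String) : List (List String) :=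
  match k, xs with
  | 0, _ => [[]]
  | _ + 1, [] => []
  | k + 1, x :: rest => (pvCombA k rest).map (fun c => x :: c) ++ pvCombA (k + 1) rest

def get_combinations_of_choices (choices : List String) (max_length : Int) : List String :=
  -- the two asserts raise outside Pre_; inside Pre_ they are no-ops
  (PySem.List.pyRange 1 (max_length + 1) 1).foldl
    (fun combinations length =>
      combinations ++ (pvCombA length.toNat choices).map (fun x => PySem.Str.join "##" x))
    []

-- ===== PORT B =====
-- emit(start, picked, target): the 'for i in range(start, n)' loop is ported as
-- structural recursion over the suffix choices[start:] (exact: the loop reads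
-- exactly choices[start], choices[start+1], …); appending to the shared 'out'
-- list becomes threading 'out' through the calls.
def pvEmitB (target : Nat) : List String → List String → List String → List String
  | rest, picked, out =>
    if picked.length = target then out ++ [PySem.Str.join "##" picked]
    else
      match rest with
      | [] => out
      | x :: xs => pvEmitB target xs picked (pvEmitB target xs (picked ++ [x]) out)

def get_combinations_of_choices_alt (choices : List String) (max_length : Int) : List String :=
  (PySem.List.pyRange 1 (max_length + 1) 1).foldl
    (fun out target => pvEmitB target.toNat choices [] out)
    []

-- ===== PRECONDITION & SPEC =====
-- Pre_: A's asserts raise (AssertionError) when "##" is an element of choices or max_length > len(choices)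
def Pre_get_combinations_of_choices (choices : List String) (max_length : Int) : Prop :=
  ¬ ("##" ∈ choices) ∧ max_length ≤ (choices.length : Int)
instance (choices : List String) (max_length : Int) : Decidable (Pre_get_combinations_of_choices choices max_length) := by unfold Pre_get_combinations_of_choices; infer_instance
def pvWitness_get_combinations_of_choices : List String × Int := (["a", "b", "c"], 2)

def Spec_get_combinations_of_choices (choices : List String) (max_length : Int) (out : List String) : Prop := out = get_combinations_of_choices_alt choices max_length
instance (choices : List String) (max_length : Int) (out : List String) : Decidable (Spec_get_combinations_of_choices choices max_length out) := by unfold Spec_get_combinations_of_choices; infer_instance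

-- ===== CLAIM (what is proved, stated in full; the proofs are below) =====
def Claim_equal_get_combinations_of_choices : Prop := ∀ (choices : List String) (max_length : Int), Dom_get_combinations_of_choices choices max_length → Pre_get_combinations_of_choices choices max_length → Spec_get_combinations_of_choices choices max_length (get_combinations_of_choices choices max_length)

-- ===== LEMMAS AND PROOFS =====

theorem pvEmitB_spec (target : Nat) : ∀ (rest picked out : List String), picked.length ≤ target →
    pvEmitB target rest picked out =
      out ++ (pvCombA (target - picked.length) rest).map (fun c => PySem.Str.join "##" (picked ++ c)) := by
  intro rest
  induction rest with
  | nil =>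
    intro picked out h
    rw [pvEmitB]
    by_cases he : picked.length = target
    · simp [he, pvCombA]
    · obtain ⟨m, hm⟩ : ∃ m, target - picked.length = m + 1 := ⟨target - picked.length - 1, by omega⟩
      simp [he, hm, pvCombA]
  | cons x xs ih =>
    intro picked out h
    rw [pvEmitB]
    by_cases he : picked.length = target
    · simp [he, pvCombA]
    · have h1 : (picked ++ [x]).length ≤ target := by simp; omega
      simp only [he, if_false]
      rw [ih (picked ++ [x]) out h1, ih picked _ h]
      obtain ⟨m, hm⟩ : ∃ m, target - picked.length = m + 1 := ⟨target - picked.length - 1, by omega⟩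
      have hm2 : target - (picked ++ [x]).length = m := by simp; omega
      rw [hm, hm2, pvCombA]
      simp [List.map_append, List.append_assoc]

theorem step_eq (choices : List String) (t : Int) (out : List String) :
    out ++ (pvCombA t.toNat choices).map (fun x => PySem.Str.join "##" x) =
      pvEmitB t.toNat choices [] out := by
  rw [pvEmitB_spec t.toNat choices [] out (by simp)]
  simp

-- ===== VERDICT (by name: the statement is the Claim_ definition above) =====
theorem get_combinations_of_choices_spec : Claim_equal_get_combinations_of_choices := by
  intro choices max_length _ _
  unfold Spec_get_combinations_of_choices get_combinations_of_choices get_combinations_of_choices_alt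
  apply PySem.List.foldl_congr_mem
  intro out t _
  exact step_eq choices t out
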